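-- pv_equiv track=rewrite | github.com/linhdvu14/cp-sols | sols/CodeForces/1671_edu/A_String_Building.py | solve
-- ===== SOURCE A (Python) =====
-- def solve(S):
--     cnt = 0
--     k = ''
--     for c in S:
--         if c != k:
--             if cnt == 1: return 'NO'
--             cnt = 0
--         k = c
--         cnt += 1
--     if cnt == 1: return 'NO'
--     return 'YES'
-- ===== SOURCE B (Python) =====
-- def solve(S):
--     n = len(S)
--     ok = all((i > 0 and S[i - 1] == S[i]) or (i + 1 < n and S[i + 1] == S[i])
--              for i in range(n))
--     return 'YES' if ok else 'NO'
-- ===== Notes on version B (the rewrite author's own statement) =====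
-- stated objective: alternative
-- what changed: B tests each character independently for an equal neighbour (left or right) with an index-wise all() over the whole string, instead of A's run-length state machine that threads a counter and previous-char state with a separate final-tail check.
import Mathlib
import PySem

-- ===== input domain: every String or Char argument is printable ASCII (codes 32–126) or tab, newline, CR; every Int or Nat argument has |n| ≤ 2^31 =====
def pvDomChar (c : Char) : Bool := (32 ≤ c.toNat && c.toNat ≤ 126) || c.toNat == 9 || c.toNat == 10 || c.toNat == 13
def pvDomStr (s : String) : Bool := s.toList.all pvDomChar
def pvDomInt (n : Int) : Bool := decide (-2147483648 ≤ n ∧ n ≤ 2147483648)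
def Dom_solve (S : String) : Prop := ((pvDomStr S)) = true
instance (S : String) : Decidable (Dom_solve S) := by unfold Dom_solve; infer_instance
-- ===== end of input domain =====

-- B tests each character independently for an equal left or right neighbour with an
-- index-wise all() over the string, replacing A's counter/previous-char state machine;
-- objective: alternative decomposition, same cost.

-- ===== PORT A =====
-- the for-loop of A: state cnt (the running count) and k (the previous char, none = initial '')
def solveLoop : List Char → Nat → Option Char → String
  | [], cnt, _ => if cnt = 1 then "NO" else "YES"
  | c :: t, cnt, k =>
      if some c ≠ k then
        if cnt = 1 then "NO" else solveLoop t 1 (some c)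
      else solveLoop t (cnt + 1) k

def solve (S : String) : String := solveLoop S.toList 0 none

-- ===== PORT B =====
-- Source B: all((i > 0 and S[i-1] == S[i]) or (i+1 < n and S[i+1] == S[i]) for i in range(n))
-- (the i>0 / i+1<n guards make every index in range, so getD is exact here)
def solve_alt (S : String) : String :=
  let l := S.toList
  let n := l.length
  let ok := (List.range n).all (fun i =>
      (decide (0 < i) && (l.getD (i - 1) ' ' == l.getD i ' ')) ||
      (decide (i + 1 < n) && (l.getD (i + 1) ' ' == l.getD i ' ')))
  if ok then "YES" else "NO"

-- ===== PRECONDITION & SPEC =====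
def Spec_solve (S : String) (out : String) : Prop := out = solve_alt S
instance (S : String) (out : String) : Decidable (Spec_solve S out) := by unfold Spec_solve; infer_instance

-- ===== CLAIM (what is proved, stated in full; the proofs are below) =====
def Claim_equal_solve : Prop := ∀ (S : String), Dom_solve S → Spec_solve S (solve S)

-- ===== LEMMAS AND PROOFS =====

-- middle state machine: hScan p safe t = "every char incl. the prev char p sits next to an
-- equal char, given the prev char is already `safe`, continuing through t"
def hScan : Option Char → Bool → List Char → Bool
  | _, safe, [] => safe
  | p, safe, c :: t => if some c = p then hScan (some c) true t else safe && hScan (some c) false t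

def toYN (b : Bool) : String := if b then "YES" else "NO"

-- B's neighbour test for the suffix t, with d the character just before t
def okA (d : Char) (t : List Char) (i : Nat) : Bool :=
  (if i = 0 then d == t.getD 0 ' ' else t.getD (i - 1) ' ' == t.getD i ' ')
  || (decide (i + 1 < t.length) && (t.getD (i + 1) ' ' == t.getD i ' '))

theorem bridge (c : Char) (t : List Char) :
    (((decide (0 < t.length)) && (t.getD 0 ' ' == c)) && hScan (some c) true t)
      = hScan (some c) false t := by
  cases t with
  | nil => simp [hScan]
  | cons e t' =>
    by_cases h : e = c
    · subst h; simp [hScan]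
    · simp [hScan, h]

theorem L2 : ∀ (t : List Char) (d : Char),
    (List.range t.length).all (okA d t) = hScan (some d) true t := by
  intro t
  induction t with
  | nil => intro d; simp [hScan]
  | cons c t' ih =>
    intro d
    have hshift : (fun i => okA d (c :: t') (i + 1)) = okA c t' := by
      funext i
      cases i with
      | zero => simp [okA, Nat.lt_iff_add_one_le]
      | succ j => simp [okA]
    rw [List.length_cons, List.range_succ_eq_map]
    simp only [List.all_cons, List.all_map, Function.comp_def, Nat.succ_eq_add_one, hshift, ih c]
    by_cases h : c = d
    · subst h; simp [okA, hScan]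
    · have hok : okA d (c :: t') 0
          = ((decide (0 < t'.length)) && (t'.getD 0 ' ' == c)) := by
        simp [okA, Ne.symm h]
      rw [hok, bridge c t']
      simp [hScan, h]

theorem LB : ∀ (l : List Char),
    ((List.range l.length).all (fun i =>
      (decide (0 < i) && (l.getD (i - 1) ' ' == l.getD i ' ')) ||
      (decide (i + 1 < l.length) && (l.getD (i + 1) ' ' == l.getD i ' '))))
      = hScan none true l := by
  intro l
  cases l with
  | nil => simp [hScan]
  | cons c t =>
    have hshift : (fun i =>
        (decide (0 < i + 1) && ((c :: t).getD (i + 1 - 1) ' ' == (c :: t).getD (i + 1) ' ')) ||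
        (decide (i + 1 + 1 < t.length + 1) && ((c :: t).getD (i + 1 + 1) ' ' == (c :: t).getD (i + 1) ' ')))
        = okA c t := by
      funext i
      cases i with
      | zero => simp [okA, Nat.lt_iff_add_one_le]
      | succ j => simp [okA]
    rw [List.length_cons, List.range_succ_eq_map]
    simp only [List.all_cons, List.all_map, Function.comp_def, Nat.succ_eq_add_one]
    rw [hshift, L2 t c]
    have h0 : ((decide (0 < 0) && ((c :: t).getD (0 - 1) ' ' == (c :: t).getD 0 ' ')) ||
        (decide (0 + 1 < t.length + 1) && ((c :: t).getD (0 + 1) ' ' == (c :: t).getD 0 ' ')))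
        = ((decide (0 < t.length)) && (t.getD 0 ' ' == c)) := by
      simp
    rw [h0, bridge c t]
    simp [hScan]

-- A's loop equals the middle state machine
theorem key : ∀ (t : List Char),
    (∀ d, solveLoop t 1 (some d) = toYN (hScan (some d) false t)) ∧
    (∀ d cnt, 2 ≤ cnt → solveLoop t cnt (some d) = toYN (hScan (some d) true t)) := by
  intro t
  induction t with
  | nil =>
    constructor
    · intro d; simp [solveLoop, hScan, toYN]
    · intro d cnt h2
      have : cnt ≠ 1 := by omega
      simp [solveLoop, hScan, toYN, this]
  | cons c t' ih =>
    constructor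
    · intro d
      by_cases h : c = d
      · subst h
        have := ih.2 c 2 (by omega)
        simp [solveLoop, hScan, this]
      · simp [solveLoop, hScan, h, toYN]
    · intro d cnt h2
      have hcnt : cnt ≠ 1 := by omega
      by_cases h : c = d
      · subst h
        have := ih.2 c (cnt + 1) (by omega)
        simp [solveLoop, hScan, this]
      · have := ih.1 c
        simp [solveLoop, hScan, h, hcnt, this]

theorem solveA_eq (l : List Char) : solveLoop l 0 none = toYN (hScan none true l) := by
  cases l with
  | nil => simp [solveLoop, hScan, toYN]
  | cons c t =>
    have h1 := (key t).1 c
    simp [solveLoop, hScan, h1]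

theorem alt_eq (S : String) : solve_alt S = toYN (hScan none true S.toList) := by
  simp only [solve_alt]
  rw [LB]
  rfl

-- ===== VERDICT (by name: the statement is the Claim_ definition above) =====
theorem solve_spec : Claim_equal_solve := by
  intro S _
  unfold Spec_solve solve
  rw [solveA_eq, alt_eq]
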